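-- pv_equiv track=rewrite | github.com/TranNam2000/mutli_agent | orchestrator.py | _smart_trim
-- ===== SOURCE A (Python) =====
-- def _smart_trim(text: str, max_chars: int, keep_headers: bool = True) -> str:
--     """
--     Smart truncation: keeps markdown headers and first paragraph of each section.
--     Falls back to simple truncation when text is short enough.
--     """
--     if len(text) <= max_chars:
--         return text
--
--     if not keep_headers:
--         return text[:max_chars] + "\n\n...[truncated]"
--
--     lines = text.splitlines()
--     result = []
--     budget = max_chars
--
--     for line in lines:
--         entry = line + "\n"
--         if len(entry) > budget:
--             if budget > 40:
--                 result.append(line[:budget] + "...")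
--             break
--         result.append(entry)
--         budget -= len(entry)
--         if budget <= 0:
--             break
--
--     return "".join(result)
-- ===== SOURCE B (Python) =====
-- def _smart_trim(text: str, max_chars: int, keep_headers: bool = True) -> str:
--     """Table + binary search: build prefix sums of entry lengths, binary-search
--     the largest fitting prefix, then reconstruct with '\n'.join."""
--     if len(text) <= max_chars:
--         return text
--     if not keep_headers:
--         return text[:max_chars] + "\n\n...[truncated]"
--     lines = text.splitlines()
--     prefix = [0]
--     total = 0
--     for line in lines:
--         total += len(line) + 1
--         prefix.append(total)
--     # prefix is strictly increasing; find the largest j with prefix[j] <= max_chars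
--     lo, hi = 0, len(lines)
--     while lo < hi:
--         mid = (lo + hi + 1) // 2
--         if prefix[mid] <= max_chars:
--             lo = mid
--         else:
--             hi = mid - 1
--     j = lo
--     out = "\n".join(lines[:j])
--     if j:
--         out += "\n"
--     if j < len(lines):
--         remaining = max_chars - prefix[j]
--         if remaining > 40:
--             out += lines[j][:remaining] + "..."
--     return out
-- ===== Notes on version B (the rewrite author's own statement) =====
-- stated objective: alternative
-- what changed: A's single greedy loop with a running budget is replaced by a staged table algorithm: build a prefix-sum table of entry lengths, binary-search it for the largest fitting prefix, then reconstruct the output with '\n'.join plus an optional partial line.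
import Mathlib
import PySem

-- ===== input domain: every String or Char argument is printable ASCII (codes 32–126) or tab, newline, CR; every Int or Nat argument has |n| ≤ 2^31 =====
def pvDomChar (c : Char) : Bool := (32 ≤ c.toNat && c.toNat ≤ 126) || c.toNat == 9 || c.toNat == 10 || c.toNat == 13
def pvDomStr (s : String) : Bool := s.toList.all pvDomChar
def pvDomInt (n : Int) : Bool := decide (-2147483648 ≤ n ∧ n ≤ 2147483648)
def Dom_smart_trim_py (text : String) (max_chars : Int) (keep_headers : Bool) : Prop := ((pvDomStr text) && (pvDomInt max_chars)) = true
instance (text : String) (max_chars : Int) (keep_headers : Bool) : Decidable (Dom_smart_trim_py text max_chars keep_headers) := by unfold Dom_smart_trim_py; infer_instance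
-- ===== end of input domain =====

-- B replaces A's running-budget greedy loop by a staged table algorithm: a prefix-sum
-- table of entry lengths, a binary search for the largest fitting prefix, and a
-- '\n'.join reconstruction; objective: alternative (same cost).

-- ===== PORT A =====
-- the 'for line in lines' loop of A: running budget, result accumulator, two breaks
def pvALoop : List (List Char) → Int → List (List Char) → List (List Char)
  | [], _, acc => acc
  | line :: rest, budget, acc =>
    let entry := line ++ ['\n']
    if (entry.length : Int) > budget then
      if budget > 40 then acc ++ [PySem.List.slice line none (some budget) ++ "...".toList]
      else acc
    else
      let budget' := budget - (entry.length : Int)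
      if budget' ≤ 0 then acc ++ [entry]
      else pvALoop rest budget' (acc ++ [entry])

def smart_trim_py (text : String) (max_chars : Int) (keep_headers : Bool) : String :=
  if ((text.toList.length : Int) ≤ max_chars) then text
  else if keep_headers = false then
    String.ofList (PySem.List.slice text.toList none (some max_chars) ++ "\n\n...[truncated]".toList)
  else
    let lines := PySem.Chars.splitlines text.toList
    String.ofList (PySem.Chars.join [] (pvALoop lines max_chars []))

-- ===== PORT B =====
-- 'prefix = [0]; total = 0; for line in lines: total += len(line)+1; prefix.append(total)'
def pvPrefix (lines : List (List Char)) : List Int :=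
  (lines.foldl (fun (st : List Int × Int) line =>
      (st.1 ++ [st.2 + (line.length : Int) + 1], st.2 + (line.length : Int) + 1)) ([0], 0)).1

-- 'while lo < hi: mid = (lo+hi+1)//2; if prefix[mid] <= max_chars: lo = mid else: hi = mid-1'
def pvBSearch (pre : List Int) (mc : Int) (lo hi : Nat) : Nat :=
  if h : lo < hi then
    let mid := (lo + hi + 1) / 2
    if PySem.List.pyGetD pre (mid : Int) 0 ≤ mc then pvBSearch pre mc mid hi
    else pvBSearch pre mc lo (mid - 1)
  else lo
termination_by hi - lo
decreasing_by all_goals omega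

def smart_trim_py_alt (text : String) (max_chars : Int) (keep_headers : Bool) : String :=
  if ((text.toList.length : Int) ≤ max_chars) then text
  else if keep_headers = false then
    String.ofList (PySem.List.slice text.toList none (some max_chars) ++ "\n\n...[truncated]".toList)
  else
    let lines := PySem.Chars.splitlines text.toList
    let pre := pvPrefix lines
    let j := pvBSearch pre max_chars 0 lines.length
    let out := PySem.Chars.join ['\n'] (lines.take j)
    let out := if j ≠ 0 then out ++ ['\n'] else out
    let out := if j < lines.length then
        (if max_chars - PySem.List.pyGetD pre (j : Int) 0 > 40 then
          out ++ PySem.List.slice (PySem.List.pyGetD lines (j : Int) []) none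
                   (some (max_chars - PySem.List.pyGetD pre (j : Int) 0)) ++ "...".toList
        else out)
      else out
    String.ofList out

-- ===== PRECONDITION & SPEC =====
def Spec_smart_trim_py (text : String) (max_chars : Int) (keep_headers : Bool) (out : String) : Prop := out = smart_trim_py_alt text max_chars keep_headers
instance (text : String) (max_chars : Int) (keep_headers : Bool) (out : String) : Decidable (Spec_smart_trim_py text max_chars keep_headers out) := by unfold Spec_smart_trim_py; infer_instance

-- ===== CLAIM =====
def Claim_equal_smart_trim_py : Prop := ∀ (text : String) (max_chars : Int) (keep_headers : Bool), Dom_smart_trim_py text max_chars keep_headers → Spec_smart_trim_py text max_chars keep_headers (smart_trim_py text max_chars keep_headers)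

-- ===== LEMMAS AND PROOFS =====

-- join with empty separator is flatten
theorem pv_join_nil (ps : List (List Char)) : PySem.Chars.join [] ps = ps.flatten := by
  induction ps with
  | nil => rfl
  | cons p ps ih =>
    cases ps with
    | nil => simp [PySem.Chars.join, List.intercalate]
    | cons q qs =>
      rw [PySem.Chars.join_cons_cons, ih]
      simp

-- A's accumulator splits off
theorem pvALoop_acc (lines : List (List Char)) (b : Int) (acc : List (List Char)) :
    pvALoop lines b acc = acc ++ pvALoop lines b [] := by
  induction lines generalizing b acc with
  | nil => simp [pvALoop]
  | cons line rest ih =>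
    simp only [pvALoop]
    split_ifs
    · simp
    · simp
    · simp
    · rw [ih _ (acc ++ [line ++ ['\n']]), ih _ ([] ++ [line ++ ['\n']])]
      simp

-- proof-side closed recursion: how many lines fit (k) and how many chars they use (s)
def pvKS : List (List Char) → Int → Nat × Int
  | [], _ => (0, 0)
  | line :: rest, b =>
    if (line.length : Int) + 1 ≤ b then
      let ks := pvKS rest (b - ((line.length : Int) + 1))
      (ks.1 + 1, ((line.length : Int) + 1) + ks.2)
    else (0, 0)

theorem pvKS_nonpos (lines : List (List Char)) (b : Int) (hb : b ≤ 0) :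
    pvKS lines b = (0, 0) := by
  cases lines with
  | nil => rfl
  | cons line rest =>
    simp only [pvKS]
    rw [if_neg (by omega)]

-- what B renders for a suffix of lines at remaining budget b (shared normal form)
def pvBTail (lines : List (List Char)) (b : Int) : List Char :=
  let k := (pvKS lines b).1
  let s := (pvKS lines b).2
  let out := ((lines.take k).map (fun l => l ++ ['\n'])).flatten
  if k < lines.length then
    (if b - s > 40 then
      out ++ PySem.List.slice (PySem.List.pyGetD lines (k : Int) []) none (some (b - s)) ++ "...".toList
    else out)
  else out

theorem pv_main (lines : List (List Char)) (b : Int) :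
    (pvALoop lines b []).flatten = pvBTail lines b := by
  induction lines generalizing b with
  | nil => simp [pvALoop, pvBTail, pvKS]
  | cons line rest ih =>
    simp only [pvALoop]
    by_cases h1 : ((line ++ ['\n']).length : Int) > b
    · rw [if_pos h1]
      have hlt : ¬ ((line.length : Int) < b) := by
        simp at h1; omega
      have hB : pvBTail (line :: rest) b =
          if b > 40 then PySem.List.slice line none (some b) ++ "...".toList else [] := by
        simp [pvBTail, pvKS, hlt, PySem.List.pyGetD_zero_cons]
      rw [hB]
      split_ifs <;> simp
    · rw [if_neg h1]
      have hlen : (line.length : Int) + 1 ≤ b := by simp at h1; omega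
      have hb' : b - ((line ++ ['\n']).length : Int) = b - ((line.length : Int) + 1) := by simp
      by_cases h2 : b - ((line ++ ['\n']).length : Int) ≤ 0
      · rw [if_pos h2]
        have hlt : (line.length : Int) < b := by simp at h1; omega
        have h0 : pvKS rest (b - ((line.length : Int) + 1)) = (0, 0) :=
          pvKS_nonpos _ _ (by omega)
        have hrem : ¬ (40 < b - ((line.length : Int) + 1)) := by simp at h2; omega
        simp [pvBTail, pvKS, hlt, h0, hrem]
      · rw [if_neg h2]
        rw [pvALoop_acc, List.flatten_append]
        rw [hb'] at h2 ⊢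
        rw [ih (b - ((line.length : Int) + 1))]
        set b' := b - ((line.length : Int) + 1) with hb'def
        have hlen' : (line.length : Int) + 1 ≤ b := hlen
        simp only [pvBTail, pvKS, if_pos hlen']
        set ks := pvKS rest b' with hks
        have hsub : b - (((line.length : Int) + 1) + ks.2) = b' - ks.2 := by omega
        simp only [List.take_succ_cons, List.map_cons, List.flatten_cons, List.length_cons,
          Nat.add_lt_add_iff_right, hsub]
        have hget : PySem.List.pyGetD (line :: rest) (((ks.1 + 1 : Nat)) : Int) ([] : List Char)
            = PySem.List.pyGetD rest ((ks.1 : Nat) : Int) ([] : List Char) := by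
          rw [PySem.List.pyGetD_natCast, PySem.List.pyGetD_natCast]
          simp [List.getD]
        rw [hget]
        split_ifs <;> simp

-- ---- prefix-sum table characterisation ----

-- cumulative entry length of the first j lines
def pvS (lines : List (List Char)) (j : Nat) : Int :=
  ((lines.take j).map (fun l => (l.length : Int) + 1)).sum

theorem pvS_zero (lines : List (List Char)) : pvS lines 0 = 0 := rfl

theorem pvS_succ_cons (l : List Char) (rest : List (List Char)) (j : Nat) :
    pvS (l :: rest) (j + 1) = ((l.length : Int) + 1) + pvS rest j := by
  simp [pvS]

theorem pvS_stable (lines : List (List Char)) (j : Nat) (h : lines.length ≤ j) :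
    pvS lines j = pvS lines lines.length := by
  simp [pvS, List.take_of_length_le h, List.take_of_length_le (le_refl lines.length)]

theorem pvS_succ (lines : List (List Char)) (j : Nat) (h : j < lines.length) :
    pvS lines (j + 1) = pvS lines j + ((lines.getD j []).length + 1) := by
  induction lines generalizing j with
  | nil => simp at h
  | cons l rest ih =>
    cases j with
    | zero => simp [pvS]
    | succ j =>
      rw [pvS_succ_cons, pvS_succ_cons, ih j (by simpa using h)]
      simp [List.getD]
      ring

theorem pvS_le (lines : List (List Char)) (j k : Nat) (h : j ≤ k) :
    pvS lines j ≤ pvS lines k := by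
  induction k with
  | zero => interval_cases j; rfl
  | succ k ih =>
    rcases Nat.lt_or_ge j (k + 1) with hlt | hge
    · have h1 : pvS lines j ≤ pvS lines k := ih (by omega)
      by_cases hk : k < lines.length
      · rw [pvS_succ lines k hk]; have : (0:Int) ≤ (lines.getD k []).length + 1 := by positivity
        omega
      · rw [pvS_stable lines (k+1) (by omega), ← pvS_stable lines k (by omega)]; exact h1
    · have hj : j = k + 1 := by omega
      rw [hj]

-- proof-side scan of the running totals
def pvScan : List (List Char) → Int → List Int
  | [], _ => []
  | l :: rest, t => (t + (l.length : Int) + 1) :: pvScan rest (t + (l.length : Int) + 1)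

theorem pvPrefix_foldl (lines : List (List Char)) (acc : List Int) (t : Int) :
    (lines.foldl (fun (st : List Int × Int) line =>
        (st.1 ++ [st.2 + (line.length : Int) + 1], st.2 + (line.length : Int) + 1)) (acc, t)).1
      = acc ++ pvScan lines t := by
  induction lines generalizing acc t with
  | nil => simp [pvScan]
  | cons l rest ih =>
    simp only [List.foldl_cons, pvScan]
    rw [ih]
    simp

theorem pvPrefix_eq (lines : List (List Char)) : pvPrefix lines = 0 :: pvScan lines 0 := by
  unfold pvPrefix
  rw [pvPrefix_foldl]
  rfl

theorem pvScan_getD (lines : List (List Char)) (t : Int) (j : Nat) (h : j < lines.length) :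
    (pvScan lines t).getD j 0 = t + pvS lines (j + 1) := by
  induction lines generalizing t j with
  | nil => simp at h
  | cons l rest ih =>
    cases j with
    | zero => simp [pvScan, pvS]; ring
    | succ j =>
      simp only [pvScan, List.getD_cons_succ]
      rw [ih _ j (by simpa using h), pvS_succ_cons]
      ring

theorem pvPrefix_getD (lines : List (List Char)) (j : Nat) (h : j ≤ lines.length) :
    PySem.List.pyGetD (pvPrefix lines) (j : Int) 0 = pvS lines j := by
  rw [PySem.List.pyGetD_natCast, pvPrefix_eq]
  cases j with
  | zero => simp [pvS]
  | succ j =>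
    simp only [List.getD_cons_succ]
    rw [pvScan_getD lines 0 j (by omega)]
    ring

-- ---- pvKS facts ----

theorem pvKS_le_length (lines : List (List Char)) (b : Int) :
    (pvKS lines b).1 ≤ lines.length := by
  induction lines generalizing b with
  | nil => simp [pvKS]
  | cons l rest ih =>
    simp only [pvKS]
    split_ifs
    · simpa using Nat.succ_le_succ (ih _)
    · simp

theorem pvKS_snd (lines : List (List Char)) (b : Int) :
    (pvKS lines b).2 = pvS lines (pvKS lines b).1 := by
  induction lines generalizing b with
  | nil => simp [pvKS, pvS]
  | cons l rest ih =>
    simp only [pvKS]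
    split_ifs
    · simp only []
      rw [ih, pvS_succ_cons]
    · simp [pvS]

theorem pvKS_fits (lines : List (List Char)) (b : Int) :
    (pvKS lines b).1 = 0 ∨ pvS lines (pvKS lines b).1 ≤ b := by
  induction lines generalizing b with
  | nil => left; simp [pvKS]
  | cons l rest ih =>
    simp only [pvKS]
    split_ifs with hfit
    · right
      rcases ih (b - ((l.length : Int) + 1)) with h0 | hle
      · simp only [h0]
        rw [pvS_succ_cons, pvS_zero]
        omega
      · simp only []
        rw [pvS_succ_cons]
        omega
    · left; rfl

theorem pvKS_next (lines : List (List Char)) (b : Int)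
    (h : (pvKS lines b).1 < lines.length) :
    b < pvS lines ((pvKS lines b).1 + 1) := by
  induction lines generalizing b with
  | nil => simp at h
  | cons l rest ih =>
    by_cases hfit : (l.length : Int) + 1 ≤ b
    · have hk : (pvKS (l :: rest) b).1 = (pvKS rest (b - ((l.length : Int) + 1))).1 + 1 := by
        simp [pvKS, hfit]
      rw [hk, pvS_succ_cons]
      have hlt : (pvKS rest (b - ((l.length : Int) + 1))).1 < rest.length := by
        rw [hk] at h; simpa using h
      have := ih (b - ((l.length : Int) + 1)) hlt
      omega
    · have hk : (pvKS (l :: rest) b).1 = 0 := by simp [pvKS, hfit]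
      rw [hk, pvS_succ_cons, pvS_zero]
      omega

-- ---- binary-search correctness ----

theorem pvBSearch_finds (lines : List (List Char)) (mc : Int) :
    ∀ d lo hi, hi - lo ≤ d → lo ≤ (pvKS lines mc).1 → (pvKS lines mc).1 ≤ hi →
      hi ≤ lines.length →
      pvBSearch (pvPrefix lines) mc lo hi = (pvKS lines mc).1 := by
  intro d
  induction d with
  | zero =>
    intro lo hi hd hlo hhi _
    rw [pvBSearch, dif_neg (by omega)]
    omega
  | succ d ih =>
    intro lo hi hd hlo hhi hn
    by_cases h : lo < hi
    · rw [pvBSearch, dif_pos h]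
      simp only []
      set mid := (lo + hi + 1) / 2 with hmid
      have hmid1 : lo < mid := by omega
      have hmid2 : mid ≤ hi := by omega
      rw [pvPrefix_getD lines mid (by omega)]
      by_cases hle : pvS lines mid ≤ mc
      · rw [if_pos hle]
        have hms : mid ≤ (pvKS lines mc).1 := by
          by_contra hc
          push_neg at hc
          have h1 : mc < pvS lines ((pvKS lines mc).1 + 1) :=
            pvKS_next lines mc (by omega)
          have h2 : pvS lines ((pvKS lines mc).1 + 1) ≤ pvS lines mid :=
            pvS_le lines _ _ (by omega)
          omega
        exact ih mid hi (by omega) hms hhi hn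
      · rw [if_neg hle]
        have hms : (pvKS lines mc).1 ≤ mid - 1 := by
          by_contra hc
          push_neg at hc
          have hge : mid ≤ (pvKS lines mc).1 := by omega
          rcases pvKS_fits lines mc with h0 | hfit
          · omega
          · have h2 : pvS lines mid ≤ pvS lines (pvKS lines mc).1 :=
              pvS_le lines _ _ hge
            omega
        exact ih lo (mid - 1) (by omega) hlo hms (by omega)
    · rw [pvBSearch, dif_neg h]
      omega

-- ---- '\n'.join reconstruction equals flatten of entry lines ----

theorem pv_join_nl (L : List (List Char)) :
    (L.map (fun l => l ++ ['\n'])).flatten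
      = PySem.Chars.join ['\n'] L ++ (if L = [] then [] else ['\n']) := by
  induction L with
  | nil => simp [PySem.Chars.join, List.intercalate]
  | cons l rest ih =>
    cases rest with
    | nil => simp [PySem.Chars.join, List.intercalate]
    | cons q qs =>
      rw [List.map_cons, List.flatten_cons, ih, PySem.Chars.join_cons_cons]
      simp

-- ===== VERDICT (by name: the statement is the Claim_ definition above) =====
theorem smart_trim_py_spec : Claim_equal_smart_trim_py := by
  intro text max_chars keep_headers _
  unfold Spec_smart_trim_py smart_trim_py smart_trim_py_alt
  split_ifs with h1 h2
  · rfl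
  · rfl
  · simp only []
    set lines := PySem.Chars.splitlines text.toList with hlines
    set jstar := (pvKS lines max_chars).1 with hjstar
    have hj : pvBSearch (pvPrefix lines) max_chars 0 lines.length = jstar :=
      pvBSearch_finds lines max_chars lines.length 0 lines.length (by omega)
        (by omega) (pvKS_le_length lines max_chars) (le_refl _)
    rw [hj]
    congr 1
    rw [pv_join_nil, pv_main]
    have hpre : PySem.List.pyGetD (pvPrefix lines) (jstar : Int) 0 = (pvKS lines max_chars).2 := by
      rw [pvPrefix_getD lines jstar (pvKS_le_length lines max_chars), pvKS_snd]
    rw [hpre]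
    have htake : ((lines.take jstar).map (fun l => l ++ ['\n'])).flatten
        = PySem.Chars.join ['\n'] (lines.take jstar)
            ++ (if jstar ≠ 0 then ['\n'] else []) := by
      rw [pv_join_nl]
      congr 1
      have hlen : jstar ≤ lines.length := pvKS_le_length lines max_chars
      by_cases h0 : jstar = 0
      · simp [h0]
      · have hne : lines.take jstar ≠ [] := by
          intro hc
          rcases List.take_eq_nil_iff.mp hc with h | h
          · exact h0 h
          · rw [h] at hlen
            simp at hlen
            omega
        simp [hne, h0]
    simp only [pvBTail, ← hjstar]
    rw [htake]
    by_cases hlt : jstar < lines.length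
    · rw [if_pos hlt, if_pos hlt]
      split_ifs <;> simp
    · rw [if_neg hlt, if_neg hlt]
      split_ifs <;> simp
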